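-- pv_equiv track=rewrite | github.com/thominho/BlockWorldProblem | BlockWorldProblem.py | actions
-- ===== SOURCE A (Python) =====
-- def actions(state):
--         validaction = []
--         validstucks = []
--         x=len(state)
--         counter=0
--         for i in state:
--                 counter=counter+1
--                 if i:
--                         validstucks.append(counter)
--         flag=0
--         counter2=0
--         for i in state:
--                 counter2=counter2+1
--                 if not i:
--                         if flag==0:
--                                 validtable=counter2
--                                 flag=1
--         a=len(validstucks)
--         j=1
--         while(j<=x):
--                 k=1
--                 flag=0
--                 i=1
--                 while(i<=a):
--                         if(j==validstucks[i-1]):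
--                                 flag=1
--                         i=i+1
--                 if flag==1:
--                         while(k<=x):
--                                 if (len(state[j-1])==1 and j!=k):
--                                         if(len(state[k-1])>=1 and j!=k):
--                                                 l=[j,k]
--                                                 validaction.append(l)
--                                 elif(len(state[j-1])>1 and j!=k):
--                                         if(len(state[k-1])>=1):
--                                                 l=[j,k]
--                                                 validaction.append(l)
--                                 k=k+1
--                         if(len(state[j-1])>1):
--                                 k=validtable
--                                 l=[j,k]
--                                 validaction.append(l)
--                 j=j+1
--         return validaction
-- ===== SOURCE B (Python) =====
-- def actions(state):
--     nonempty = [i + 1 for i, s in enumerate(state) if s]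
--     empties = [i + 1 for i, s in enumerate(state) if not s]
--
--     def rows(pre, rest):
--         if not rest:
--             return []
--         j, tail = rest[0], rest[1:]
--         row = [[j, k] for k in pre + tail]
--         if len(state[j - 1]) > 1:
--             row.append([j, empties[0]])
--         return row + rows(pre + [j], tail)
--
--     return rows([], nonempty)
-- ===== Notes on version B (the rewrite author's own statement) =====
-- stated objective: alternative
-- what changed: B replaces A's while-loops with counters, per-j linear membership scan over validstucks and per-k emptiness tests by a zipper-style structural recursion rows(pre, rest) over the precomputed nonempty index list, producing each row by mapping over pre + tail (the list with the current element removed) so no membership or emptiness test remains in the pair generation.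
-- outside the precondition, e.g. on actions([[1, 2], [3]]): A raises UnboundLocalError, B raises IndexError
import Mathlib
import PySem

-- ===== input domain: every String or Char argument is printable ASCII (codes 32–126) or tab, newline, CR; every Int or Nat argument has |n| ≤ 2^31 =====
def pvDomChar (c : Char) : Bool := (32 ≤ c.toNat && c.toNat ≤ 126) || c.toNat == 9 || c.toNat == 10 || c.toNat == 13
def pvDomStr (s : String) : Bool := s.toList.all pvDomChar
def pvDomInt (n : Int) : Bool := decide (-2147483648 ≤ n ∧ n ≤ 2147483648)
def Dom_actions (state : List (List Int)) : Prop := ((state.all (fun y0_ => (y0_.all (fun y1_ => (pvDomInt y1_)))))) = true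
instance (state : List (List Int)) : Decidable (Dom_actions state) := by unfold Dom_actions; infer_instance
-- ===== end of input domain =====

-- B replaces A's while-loops and membership scans by a structural recursion (zipper pre/rest) over the
-- nonempty-stack index list, generating each row by mapping over pre ++ tail; same return value on Pre_.
-- ===== PORT A =====
def actions (state : List (List Int)) : List (List Int) :=
  let x : Int := (state.length : Int)
  let validstucks : List Int :=
    (state.foldl (fun (p : Int × List Int) i =>
      (p.1 + 1, if i ≠ [] then p.2 ++ [p.1 + 1] else p.2)) ((0 : Int), ([] : List Int))).2
  let vt : Option Int :=
    (state.foldl (fun (p : Int × Int × Option Int) i =>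
      if i = [] then
        (if p.1 = 0 then (1, p.2.1 + 1, some (p.2.1 + 1)) else (p.1, p.2.1 + 1, p.2.2))
      else (p.1, p.2.1 + 1, p.2.2)) ((0 : Int), (0 : Int), (none : Option Int))).2.2
  let a : Int := (validstucks.length : Int)
  (PySem.List.pyRange 1 (x + 1) 1).foldl (fun validaction j =>
    let flag : Int := (PySem.List.pyRange 1 (a + 1) 1).foldl
      (fun flag i => if j = PySem.List.pyGetD validstucks (i - 1) 0 then 1 else flag) 0
    if flag = 1 then
      let acc2 := (PySem.List.pyRange 1 (x + 1) 1).foldl (fun acc2 k =>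
        if (PySem.List.pyGetD state (j - 1) []).length = 1 ∧ j ≠ k then
          (if 1 ≤ (PySem.List.pyGetD state (k - 1) []).length ∧ j ≠ k then acc2 ++ [[j, k]] else acc2)
        else if 1 < (PySem.List.pyGetD state (j - 1) []).length ∧ j ≠ k then
          (if 1 ≤ (PySem.List.pyGetD state (k - 1) []).length then acc2 ++ [[j, k]] else acc2)
        else acc2) validaction
      if 1 < (PySem.List.pyGetD state (j - 1) []).length then
        acc2 ++ [[j, vt.getD 0]]   -- Python reads the unbound validtable here when vt = none: excluded by Pre_
      else acc2
    else validaction) []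

-- ===== PORT B =====
-- the nested 'rows(pre, rest)' recursion of Source B, with its captured 'state' and 'empties' as parameters
def pvRows (state : List (List Int)) (empties : List Int) : List Int → List Int → List (List Int)
  | _, [] => []
  | pre, j :: tail =>
      (let row := (pre ++ tail).map (fun k => [j, k])
       let row := if 1 < (PySem.List.pyGetD state (j - 1) []).length
         then row ++ [[j, PySem.List.pyGetD empties 0 0]]   -- empties[0]: Python raises when empties = []; excluded by Pre_
         else row
       row ++ pvRows state empties (pre ++ [j]) tail)

def actions_alt (state : List (List Int)) : List (List Int) :=
  let nonempty : List Int :=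
    ((PySem.List.enumerate state 0).filter (fun p => decide (p.2 ≠ []))).map (fun p => p.1 + 1)
  let empties : List Int :=
    ((PySem.List.enumerate state 0).filter (fun p => decide (p.2 = []))).map (fun p => p.1 + 1)
  pvRows state empties [] nonempty

-- ===== PRECONDITION & SPEC =====
-- Pre_ excludes exactly the inputs on which Python A raises UnboundLocalError (a stack of height > 1 exists
-- but no empty stack); Python B raises IndexError on the same inputs.
def Pre_actions (state : List (List Int)) : Prop :=
  (∃ s ∈ state, s = []) ∨ (∀ s ∈ state, s.length ≤ 1)
instance (state : List (List Int)) : Decidable (Pre_actions state) := by unfold Pre_actions; infer_instance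
def pvWitness_actions : List (List Int) := [[1, 2], [], [3]]
def Spec_actions (state : List (List Int)) (out : List (List Int)) : Prop := out = actions_alt state
instance (state : List (List Int)) (out : List (List Int)) : Decidable (Spec_actions state out) := by unfold Spec_actions; infer_instance

-- ===== CLAIM (what is proved, stated in full; the proofs are below) =====
def Claim_equal_actions : Prop := ∀ (state : List (List Int)), Dom_actions state → Pre_actions state → Spec_actions state (actions state)

-- ===== LEMMAS AND PROOFS =====

-- proof-only abbreviations: the common "flatMap over the nonempty list" middle form
def pvNes (state : List (List Int)) : List Int :=
  ((PySem.List.enumerate state 0).filter (fun p => decide (p.2 ≠ []))).map (fun p => p.1 + 1)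
def pvEmp (state : List (List Int)) : List Int :=
  ((PySem.List.enumerate state 0).filter (fun p => decide (p.2 = []))).map (fun p => p.1 + 1)
def pvRow (state : List (List Int)) (tbl : Int) (j : Int) : List (List Int) :=
  ((pvNes state).filter (fun k => decide (k ≠ j))).map (fun k => [j, k]) ++
    (if 1 < (PySem.List.pyGetD state (j - 1) []).length then [[j, tbl]] else [])

-- shift a 1-based pyRange index loop to a fold over enumerate
lemma pv_foldl_pyRange_enum {α β : Type} (xs : List α) (G : β → Int → β) (acc : β) :
    (PySem.List.pyRange 1 ((xs.length : Int) + 1) 1).foldl G acc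
      = (PySem.List.enumerate xs 0).foldl (fun a p => G a (p.1 + 1)) acc := by
  have h : (PySem.List.enumerate xs 0).foldl (fun a p => G a (p.1 + 1)) acc
      = ((PySem.List.enumerate xs 0).map (fun p => p.1)).foldl (fun a j => G a (j + 1)) acc := by
    rw [List.foldl_map]
  rw [h, PySem.List.map_fst_enumerate]
  rw [PySem.List.pyRange_one 1 ((xs.length : Int) + 1), PySem.List.pyRange_one 0 (0 + (xs.length : Int))]
  rw [List.foldl_map, List.foldl_map]
  have h1 : ((xs.length : Int) + 1 - 1).toNat = xs.length := by omega
  have h2 : ((0 : Int) + (xs.length : Int) - 0).toNat = xs.length := by omega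
  rw [h1, h2]
  apply PySem.List.foldl_congr_mem
  intro a k hk
  have e : (1 : Int) + (k : Int) = (0 + (k : Int)) + 1 := by ring
  rw [e]

lemma pv_mem_fold_flag (j : Int) : ∀ (l : List Int) (f0 : Int),
    l.foldl (fun f v => if j = v then (1 : Int) else f) f0 = if j ∈ l then 1 else f0 := by
  intro l
  induction l with
  | nil => intro f0; simp
  | cons a t ih =>
    intro f0
    simp only [List.foldl_cons]
    rw [ih]
    by_cases h : j = a
    · simp [h]
    · simp [h]

-- A's while-loop membership scan over validstucks computes list membership
lemma pv_flag_pyRange (j : Int) (l : List Int) :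
    (PySem.List.pyRange 1 ((l.length : Int) + 1) 1).foldl
        (fun flag i => if j = PySem.List.pyGetD l (i - 1) 0 then (1 : Int) else flag) (0 : Int)
      = if j ∈ l then 1 else 0 := by
  rw [pv_foldl_pyRange_enum l]
  have h : (PySem.List.enumerate l 0).foldl
        (fun flag p => if j = PySem.List.pyGetD l (p.1 + 1 - 1) 0 then (1 : Int) else flag) (0 : Int)
      = (PySem.List.enumerate l 0).foldl (fun flag p => if j = p.2 then (1 : Int) else flag) (0 : Int) := by
    apply PySem.List.foldl_congr_mem
    intro f q hq
    obtain ⟨m, hm, rfl⟩ := (PySem.List.mem_enumerate_iff l 0 q).mp hq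
    have e : (0 : Int) + (m : Int) + 1 - 1 = (m : Int) := by ring
    rw [e, PySem.List.pyGetD_natCast, List.getD_eq_getElem _ _ hm]
  rw [h]
  have h2 : (PySem.List.enumerate l 0).foldl (fun flag p => if j = p.2 then (1 : Int) else flag) (0 : Int)
      = ((PySem.List.enumerate l 0).map (fun p => p.2)).foldl (fun f v => if j = v then (1 : Int) else f) (0 : Int) := by
    rw [List.foldl_map]
  rw [h2, PySem.List.map_snd_enumerate]
  exact pv_mem_fold_flag j l 0

-- A's counter loop building validstucks = the nonempty index list
lemma pv_vs_eq : ∀ (st : List (List Int)) (c : Int) (acc : List Int),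
    (st.foldl (fun (p : Int × List Int) i =>
        (p.1 + 1, if i ≠ [] then p.2 ++ [p.1 + 1] else p.2)) (c, acc)).2
      = acc ++ ((PySem.List.enumerate st c).filter (fun p => decide (p.2 ≠ []))).map (fun p => p.1 + 1) := by
  intro st
  induction st with
  | nil => intro c acc; simp [PySem.List.enumerate_nil]
  | cons i t ih =>
    intro c acc
    simp only [List.foldl_cons]
    rw [ih]
    by_cases h : i = []
    · simp [h, PySem.List.enumerate_cons]
    · simp [h, PySem.List.enumerate_cons]

lemma pv_vt_keep : ∀ (st : List (List Int)) (c : Int) (v : Option Int),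
    (st.foldl (fun (p : Int × Int × Option Int) i =>
        if i = [] then
          (if p.1 = 0 then (1, p.2.1 + 1, some (p.2.1 + 1)) else (p.1, p.2.1 + 1, p.2.2))
        else (p.1, p.2.1 + 1, p.2.2)) ((1 : Int), c, v)).2.2 = v := by
  intro st
  induction st with
  | nil => intro c v; simp
  | cons i t ih =>
    intro c v
    by_cases h : i = [] <;> simp [List.foldl_cons, h, ih]

-- A's flag/counter2 loop computes find-first-empty
lemma pv_vt_eq : ∀ (st : List (List Int)) (c : Int),
    (st.foldl (fun (p : Int × Int × Option Int) i =>
        if i = [] then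
          (if p.1 = 0 then (1, p.2.1 + 1, some (p.2.1 + 1)) else (p.1, p.2.1 + 1, p.2.2))
        else (p.1, p.2.1 + 1, p.2.2)) ((0 : Int), c, none)).2.2
      = ((PySem.List.enumerate st c).find? (fun p => decide (p.2 = []))).map (fun p => p.1 + 1) := by
  intro st
  induction st with
  | nil => intro c; simp [PySem.List.enumerate_nil]
  | cons i t ih =>
    intro c
    by_cases h : i = []
    · simp [List.foldl_cons, h, PySem.List.enumerate_cons, pv_vt_keep]
    · simp [List.foldl_cons, h, ih, PySem.List.enumerate_cons]

lemma pv_mem_nes_iff (state : List (List Int)) (k : Nat) (hk : k < state.length) :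
    (((k : Int) + 1) ∈ pvNes state) ↔ state[k] ≠ [] := by
  unfold pvNes
  simp only [List.mem_map, List.mem_filter, PySem.List.mem_enumerate_iff]
  constructor
  · rintro ⟨p, ⟨⟨k', hk', rfl⟩, hne⟩, heq⟩
    simp only [decide_eq_true_eq] at hne
    have : k' = k := by omega
    subst this; exact hne
  · intro hne
    exact ⟨((0 : Int) + (k : Int), state[k]), ⟨⟨k, hk, rfl⟩, by simpa using hne⟩, by ring⟩

-- A's inner k-scan over all stacks appends the filtered pair row (for a nonempty source stack s)
lemma pv_inner (state : List (List Int)) (j : Int) (s : List Int) (hs : s ≠ [])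
    (acc : List (List Int)) :
    (PySem.List.pyRange 1 ((state.length : Int) + 1) 1).foldl (fun acc2 k =>
        if s.length = 1 ∧ j ≠ k then
          (if 1 ≤ (PySem.List.pyGetD state (k - 1) []).length ∧ j ≠ k then acc2 ++ [[j, k]] else acc2)
        else if 1 < s.length ∧ j ≠ k then
          (if 1 ≤ (PySem.List.pyGetD state (k - 1) []).length then acc2 ++ [[j, k]] else acc2)
        else acc2) acc
      = acc ++ ((pvNes state).filter (fun k => decide (k ≠ j))).map (fun k => [j, k]) := by
  unfold pvNes
  rw [pv_foldl_pyRange_enum state]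
  have h : (PySem.List.enumerate state 0).foldl (fun acc2 q =>
        if s.length = 1 ∧ j ≠ q.1 + 1 then
          (if 1 ≤ (PySem.List.pyGetD state (q.1 + 1 - 1) []).length ∧ j ≠ q.1 + 1 then acc2 ++ [[j, q.1 + 1]] else acc2)
        else if 1 < s.length ∧ j ≠ q.1 + 1 then
          (if 1 ≤ (PySem.List.pyGetD state (q.1 + 1 - 1) []).length then acc2 ++ [[j, q.1 + 1]] else acc2)
        else acc2) acc
      = (PySem.List.enumerate state 0).foldl (fun acc2 q =>
          if q.2 ≠ [] then (if q.1 + 1 ≠ j then acc2 ++ [[j, q.1 + 1]] else acc2) else acc2) acc := by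
    apply PySem.List.foldl_congr_mem
    intro a2 q hq
    obtain ⟨m, hm, rfl⟩ := (PySem.List.mem_enumerate_iff state 0 q).mp hq
    dsimp only
    simp only [zero_add]
    have e : (m : Int) + 1 - 1 = (m : Int) := by ring
    rw [e, PySem.List.pyGetD_natCast, List.getD_eq_getElem _ _ hm]
    have h1 : s.length = 1 ∨ 1 < s.length := by
      have := List.length_pos_iff.mpr hs
      omega
    by_cases hv : state[m] = []
    · rcases h1 with h1 | h1 <;> simp [h1, hv]
    · have hlen : 1 ≤ (state[m]).length := List.length_pos_iff.mpr hv
      by_cases hjk : j = (m : Int) + 1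
      · rcases h1 with h1 | h1 <;> simp [h1, hv, hjk]
      · have hjk' : (m : Int) + 1 ≠ j := fun hh => hjk hh.symm
        rcases h1 with h1 | h1 <;> simp [h1, hv, hjk, hjk', hlen]
  rw [h]
  rw [PySem.List.foldl_ite_eq_foldl_filter (fun q : Int × List Int => q.2 ≠ [])
      (fun acc2 q => if q.1 + 1 ≠ j then acc2 ++ [[j, q.1 + 1]] else acc2)]
  rw [← List.foldl_map (f := fun p : Int × List Int => p.1 + 1)
      (g := fun (acc2 : List (List Int)) (k : Int) => if k ≠ j then acc2 ++ [[j, k]] else acc2)]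
  rw [PySem.List.foldl_ite_eq_foldl_filter (fun k : Int => k ≠ j)
      (fun (acc2 : List (List Int)) (k : Int) => acc2 ++ [[j, k]])]
  rw [PySem.List.foldl_append_singleton_eq_map]

-- A equals the flatMap-of-rows middle form
lemma pv_A_eq_flat (state : List (List Int)) :
    actions state = (pvNes state).flatMap
      (pvRow state ((((PySem.List.enumerate state 0).find? (fun p => decide (p.2 = []))).map
        (fun p => p.1 + 1)).getD 0)) := by
  simp only [actions]
  rw [pv_vs_eq state 0 []]
  simp only [List.nil_append]
  rw [pv_vt_eq state 0]
  rw [pv_foldl_pyRange_enum state]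
  rw [show ((PySem.List.enumerate state 0).filter (fun p => decide (p.2 ≠ []))).map (fun p => p.1 + 1) = pvNes state from rfl]
  trans ((PySem.List.enumerate state 0).foldl (fun out q =>
      if q.2 ≠ [] then out ++ pvRow state ((((PySem.List.enumerate state 0).find? (fun p => decide (p.2 = []))).map (fun p => p.1 + 1)).getD 0) (q.1 + 1) else out) [])
  · apply PySem.List.foldl_congr_mem
    intro acc p hp
    obtain ⟨k, hk, rfl⟩ := (PySem.List.mem_enumerate_iff state 0 p).mp hp
    dsimp only
    simp only [zero_add]
    have e : (k : Int) + 1 - 1 = (k : Int) := by ring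
    rw [e, PySem.List.pyGetD_natCast, List.getD_eq_getElem _ _ hk]
    rw [pv_flag_pyRange]
    by_cases hne : state[k] = []
    · have hm : ¬ (((k : Int) + 1) ∈ pvNes state) := by
        rw [pv_mem_nes_iff state k hk]; simp [hne]
      rw [if_neg hm, if_neg (show ¬((0 : Int) = 1) by decide),
          if_neg (show ¬(state[k] ≠ []) from fun h => h hne)]
    · have hm : (((k : Int) + 1) ∈ pvNes state) := (pv_mem_nes_iff state k hk).mpr hne
      rw [pv_inner state ((k : Int) + 1) state[k] hne acc]
      rw [if_pos hm, if_pos (rfl : (1 : Int) = 1), if_pos hne]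
      unfold pvRow
      rw [e, PySem.List.pyGetD_natCast, List.getD_eq_getElem _ _ hk]
      by_cases ht : 1 < (state[k]).length
      · simp [ht, List.append_assoc]
      · simp [ht]
  · rw [PySem.List.foldl_ite_eq_foldl_filter (fun q : Int × List Int => q.2 ≠ [])
        (fun out q => out ++ pvRow state ((((PySem.List.enumerate state 0).find? (fun p => decide (p.2 = []))).map (fun p => p.1 + 1)).getD 0) (q.1 + 1))]
    rw [← List.foldl_map (f := fun p : Int × List Int => p.1 + 1)
        (g := fun (out : List (List Int)) (k : Int) => out ++ pvRow state ((((PySem.List.enumerate state 0).find? (fun p => decide (p.2 = []))).map (fun p => p.1 + 1)).getD 0) k)]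
    rw [show ((PySem.List.enumerate state 0).filter (fun p => decide (p.2 ≠ []))).map (fun p => p.1 + 1) = pvNes state from rfl]
    rw [PySem.List.foldl_append_eq_flatMap, List.nil_append]

-- the table index: A's find-first-empty option vs B's empties-list head agree (both default to 0 when none)
lemma pv_tbl_gen (f : Int × List Int → Int) (q : Int × List Int → Bool) :
    ∀ (l : List (Int × List Int)),
      ((l.find? q).map f).getD 0 = PySem.List.pyGetD (((l.filter q).map f)) 0 0 := by
  intro l
  induction l with
  | nil => simp [PySem.List.pyGetD_zero]
  | cons a t ih =>
    by_cases h : q a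
    · simp [h, PySem.List.pyGetD_zero]
    · simp [h, ih]

lemma pv_nes_pairwise (state : List (List Int)) : (pvNes state).Pairwise (· < ·) := by
  unfold pvNes
  rw [List.pairwise_map]
  exact (List.Pairwise.filter _ (PySem.List.pairwise_lt_enumerate state 0)).imp
    (fun h => by omega)

-- B's zipper recursion over the nonempty list equals the flatMap middle form
lemma pv_rows_eq (state : List (List Int)) (tbl : Int)
    (htbl : tbl = PySem.List.pyGetD (pvEmp state) 0 0) :
    ∀ (rest pre : List Int), (pre ++ rest).Pairwise (· < ·) → pvNes state = pre ++ rest →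
      pvRows state (pvEmp state) pre rest = rest.flatMap (pvRow state tbl) := by
  intro rest
  induction rest with
  | nil => intro pre _ _; simp [pvRows]
  | cons j tail ih =>
    intro pre hpw heq
    rw [List.pairwise_append] at hpw
    obtain ⟨hp, hc, hx⟩ := hpw
    rw [List.pairwise_cons] at hc
    obtain ⟨hjt, htail⟩ := hc
    have hself : ∀ (l : List Int), (∀ a ∈ l, a ≠ j) → l.filter (fun k => decide (k ≠ j)) = l := by
      intro l h
      apply List.filter_eq_self.mpr
      intro a ha
      simpa using h a ha
    have hfil : (pvNes state).filter (fun k => decide (k ≠ j)) = pre ++ tail := by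
      rw [heq, List.filter_append, List.filter_cons]
      rw [if_neg (by simp)]
      rw [hself pre (fun a ha => by have := hx a ha j (by simp); omega),
          hself tail (fun a ha => by have := hjt a ha; omega)]
    have hpw' : ((pre ++ [j]) ++ tail).Pairwise (· < ·) := by
      rw [List.append_assoc, List.singleton_append]
      rw [List.pairwise_append]
      exact ⟨hp, List.pairwise_cons.mpr ⟨hjt, htail⟩, hx⟩
    have heq' : pvNes state = (pre ++ [j]) ++ tail := by
      rw [heq, List.append_assoc, List.singleton_append]
    rw [show pvRows state (pvEmp state) pre (j :: tail)
        = (let row := (pre ++ tail).map (fun k => [j, k])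
           let row := if 1 < (PySem.List.pyGetD state (j - 1) []).length
             then row ++ [[j, PySem.List.pyGetD (pvEmp state) 0 0]] else row
           row ++ pvRows state (pvEmp state) (pre ++ [j]) tail) from rfl]
    simp only [List.flatMap_cons]
    rw [ih (pre ++ [j]) hpw' heq']
    unfold pvRow
    rw [hfil, htbl]
    by_cases ht : 1 < (PySem.List.pyGetD state (j - 1) []).length
    · simp [ht, List.map_append, List.append_assoc]
    · simp [ht, List.map_append]

lemma pv_AB (state : List (List Int)) : actions state = actions_alt state := by
  have halt : actions_alt state = pvRows state (pvEmp state) [] (pvNes state) := rfl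
  rw [halt, pv_A_eq_flat state]
  rw [pv_tbl_gen (fun p => p.1 + 1) (fun p => decide (p.2 = [])) (PySem.List.enumerate state 0)]
  rw [show ((PySem.List.enumerate state 0).filter (fun p => decide (p.2 = []))).map (fun p => p.1 + 1) = pvEmp state from rfl]
  exact (pv_rows_eq state _ rfl (pvNes state) [] (by simpa using pv_nes_pairwise state) (by simp)).symm

-- ===== VERDICT (by name: the statement is the Claim_ definition above) =====
theorem actions_spec : Claim_equal_actions := by
  intro state _ _
  unfold Spec_actions
  exact pv_AB state
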